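-- pv_equiv track=rewrite | github.com/balaji97/dss_grade_parser | dssGradeParser.py | getDividedBySemester
-- ===== SOURCE A (Python) =====
-- def getDividedBySemester(parsedGradeCard):
--     gradesBySemester = []
--     linesOfSemester = []
--
--     numberOfLines = len(parsedGradeCard.split("\n"))
--
--     for index, line in enumerate(parsedGradeCard.split("\n")):
--         if("Semester :" in line):
--             if(len(linesOfSemester) > 0):
--                 gradesBySemester.append("\n".join(linesOfSemester))
--                 linesOfSemester = []
--         else:
--             linesOfSemester.append(line)
--             if(index == numberOfLines - 1):
--                 gradesBySemester.append("\n".join(linesOfSemester))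
--
--     return gradesBySemester
-- ===== SOURCE B (Python) =====
-- from itertools import groupby
--
-- def getDividedBySemester(parsedGradeCard):
--     lines = parsedGradeCard.split("\n")
--     return ["\n".join(group)
--             for isMarker, group in groupby(lines, key=lambda line: "Semester :" in line)
--             if not isMarker]
-- ===== Notes on version B (the rewrite author's own statement) =====
-- stated objective: simpler
-- what changed: Replaces A's manual accumulator-and-flush loop with last-index bookkeeping by a single itertools.groupby pass that partitions the lines into consecutive marker/non-marker runs and joins the non-marker runs.
import Mathlib
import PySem

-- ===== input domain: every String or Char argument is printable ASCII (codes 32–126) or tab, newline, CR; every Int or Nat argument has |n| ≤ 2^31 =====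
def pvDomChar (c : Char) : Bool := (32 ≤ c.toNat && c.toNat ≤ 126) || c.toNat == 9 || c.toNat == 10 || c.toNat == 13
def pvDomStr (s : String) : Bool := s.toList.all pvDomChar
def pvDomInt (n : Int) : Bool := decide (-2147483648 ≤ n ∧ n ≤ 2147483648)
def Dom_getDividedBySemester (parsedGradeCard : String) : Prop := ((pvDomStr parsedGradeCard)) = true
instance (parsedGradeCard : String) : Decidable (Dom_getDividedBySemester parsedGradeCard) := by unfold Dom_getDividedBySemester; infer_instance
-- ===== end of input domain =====

-- B replaces A's manual accumulator/flush loop (with its last-index bookkeeping) by a single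
-- itertools.groupby pass over the lines; objective: simpler, same result.

-- ===== PORT A =====
-- parsedGradeCard.split("\n"), used by both Pythons (exact: PySem.Chars.splitOn, separator nonempty)
def pvLines (s : String) : List String :=
  (PySem.Chars.splitOn s.toList ['\n']).map String.ofList

-- one iteration of A's for-loop: state = (gradesBySemester, linesOfSemester), element = (index, line)
def stepA (numberOfLines : Int) (st : List String × List String) (il : Int × String) :
    List String × List String :=
  if PySem.Str.isIn "Semester :" il.2 then
    if st.2.length > 0 then (st.1 ++ [PySem.Str.join "\n" st.2], []) else st
  else
    let cur := st.2 ++ [il.2]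
    if il.1 == numberOfLines - 1 then (st.1 ++ [PySem.Str.join "\n" cur], cur) else (st.1, cur)

def getDividedBySemester (parsedGradeCard : String) : List String :=
  let lines := pvLines parsedGradeCard
  let numberOfLines : Int := lines.length
  ((PySem.List.enumerate lines).foldl (stepA numberOfLines) ([], [])).1

-- ===== PORT B =====
-- Source B: groupby(lines, key=line ↦ "Semester :" in line), keep "\n".join(g) of the non-marker runs
def getDividedBySemester_alt (parsedGradeCard : String) : List String :=
  let lines := pvLines parsedGradeCard
  (lines.splitBy (fun a b =>
      PySem.Str.isIn "Semester :" a == PySem.Str.isIn "Semester :" b)).filterMap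
    (fun g => if PySem.Str.isIn "Semester :" (g.headD "") then none
              else some (PySem.Str.join "\n" g))

-- ===== PRECONDITION & SPEC =====
def Spec_getDividedBySemester (parsedGradeCard : String) (out : List String) : Prop := out = getDividedBySemester_alt parsedGradeCard
instance (parsedGradeCard : String) (out : List String) : Decidable (Spec_getDividedBySemester parsedGradeCard out) := by unfold Spec_getDividedBySemester; infer_instance

-- ===== CLAIM (what is proved, stated in full; the proofs are below) =====
def Claim_equal_getDividedBySemester : Prop := ∀ (parsedGradeCard : String), Dom_getDividedBySemester parsedGradeCard → Spec_getDividedBySemester parsedGradeCard (getDividedBySemester parsedGradeCard)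

-- ===== LEMMAS AND PROOFS =====

-- the groupby key: "Semester :" in line
def pvKey (l : String) : Bool := PySem.Str.isIn "Semester :" l

-- B's treatment of one complete run
def pvEmit (g : List String) : List String :=
  if pvKey (g.headD "") then [] else [PySem.Str.join "\n" g]

-- common spec: blocks produced from remaining lines, cur = non-marker lines accumulated so far,
-- flushed at a marker or at the end when nonempty
def pvG (cur : List String) : List String → List String
  | [] => if cur = [] then [] else [PySem.Str.join "\n" cur]
  | l :: ls =>
      if pvKey l then
        (if cur = [] then pvG [] ls else PySem.Str.join "\n" cur :: pvG [] ls)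
      else pvG (cur ++ [l]) ls

-- blocks produced when the current (nonempty) run is cur and the remaining lines are l
def pvRun (cur : List String) : List String → List String
  | [] => pvEmit cur
  | b :: l =>
      if pvKey (cur.getLastD "") == pvKey b then pvRun (cur ++ [b]) l
      else pvEmit cur ++ pvRun [b] l

lemma splitOn_go_ne_nil (sep : List Char) (fuel : Nat) (l cur : List Char)
    (acc : List (List Char)) : PySem.Chars.splitOn.go sep fuel l cur acc ≠ [] := by
  induction fuel generalizing l cur acc with
  | zero => simp [PySem.Chars.splitOn.go]
  | succ fuel ih =>
    cases l with
    | nil => simp [PySem.Chars.splitOn.go]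
    | cons c rest =>
      rw [PySem.Chars.splitOn.go]
      split
      · exact ih _ _ _
      · exact ih _ _ _

lemma pvLines_ne_nil (s : String) : pvLines s ≠ [] := by
  unfold pvLines PySem.Chars.splitOn
  intro h
  exact splitOn_go_ne_nil _ _ _ _ _ (List.map_eq_nil_iff.mp h)

-- the marker test in the ports is the key
lemma isIn_eq_pvKey (l : String) : PySem.Str.isIn "Semester :" l = pvKey l := rfl

-- A's loop: fold over enumerate from index k computes the spec pvG
lemma foldA_spec (ls : List String) (hne : ls ≠ []) (k N : Int)
    (h : k + ls.length = N) (grades cur : List String) :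
    ((PySem.List.enumerate ls k).foldl (stepA N) (grades, cur)).1 = grades ++ pvG cur ls := by
  induction ls generalizing k grades cur with
  | nil => exact absurd rfl hne
  | cons l ls ih =>
    rw [PySem.List.enumerate_cons, List.foldl_cons]
    simp only [List.length_cons] at h
    push_cast at h
    cases hls : ls with
    | nil =>
      subst hls
      have hk : (k == N - 1) = true := by
        simp only [List.length_nil, Nat.cast_zero] at h
        simp [beq_iff_eq]; omega
      simp only [stepA, isIn_eq_pvKey]
      by_cases hm : pvKey l
      · rw [if_pos hm]
        by_cases hc : cur = []
        · subst hc; simp [pvG, hm]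
        · rw [if_pos (by simpa using List.length_pos_iff.mpr hc)]
          simp [pvG, hm, hc]
      · rw [if_neg hm, hk]
        simp [pvG, hm]
    | cons b bs =>
      subst hls
      have hk : (k == N - 1) = false := by
        simp only [List.length_cons] at h
        push_cast at h
        simp [beq_eq_false_iff_ne]; omega
      have hN : k + 1 + ((b :: bs).length : Int) = N := by
        simp only [List.length_cons] at h ⊢; push_cast; omega
      simp only [stepA, isIn_eq_pvKey]
      by_cases hm : pvKey l
      · rw [if_pos hm]
        by_cases hc : cur = []
        · subst hc
          simp only [List.length_nil, gt_iff_lt, lt_self_iff_false, if_false]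
          rw [ih (by simp) (k + 1) hN grades []]
          simp [pvG, hm]
        · rw [if_pos (by simpa using List.length_pos_iff.mpr hc)]
          rw [ih (by simp) (k + 1) hN _ []]
          simp [pvG, hm, hc]
      · rw [if_neg hm, hk]
        simp only [Bool.false_eq_true, if_false]
        rw [ih (by simp) (k + 1) hN grades (cur ++ [l])]
        simp [pvG, hm]

lemma filterMap_singleton_emit (g : List String) :
    List.filterMap (fun g => if pvKey (g.headD "") then none else some (PySem.Str.join "\n" g)) [g]
      = pvEmit g := by
  unfold pvEmit
  simp only [List.headD_eq_head?]
  by_cases hm : pvKey (g.head?.getD "") <;> simp [hm]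

-- B's loop: splitBy.loop computes pvRun of the open run
lemma loopB_spec (l : List String) (a : String) (grev : List String)
    (acc : List (List String)) :
    (List.splitBy.loop (fun a b => pvKey a == pvKey b) l a grev acc).filterMap
        (fun g => if pvKey (g.headD "") then none else some (PySem.Str.join "\n" g))
      = acc.reverse.filterMap
          (fun g => if pvKey (g.headD "") then none else some (PySem.Str.join "\n" g))
        ++ pvRun (grev.reverse ++ [a]) l := by
  induction l generalizing a grev acc with
  | nil =>
    rw [List.splitBy.loop]
    simp only [List.reverse_cons, List.filterMap_append, pvRun]
    congr 1
    exact filterMap_singleton_emit _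
  | cons b l ih =>
    rw [List.splitBy.loop]
    cases hr : (pvKey a == pvKey b) with
    | true =>
      simp only [ih]
      have h1 : pvRun (grev.reverse ++ [a]) (b :: l) = pvRun (grev.reverse ++ [a] ++ [b]) l := by
        rw [pvRun, List.getLastD_concat, hr, if_pos rfl]
      rw [h1]
      simp [List.reverse_cons, List.append_assoc]
    | false =>
      simp only [ih]
      have h2 : pvRun (grev.reverse ++ [a]) (b :: l)
          = pvEmit (grev.reverse ++ [a]) ++ pvRun [b] l := by
        rw [pvRun, List.getLastD_concat, hr]; simp
      rw [h2]
      simp only [List.reverse_cons, List.filterMap_append, List.reverse_nil,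
        List.nil_append, List.append_assoc]
      congr 2
      exact filterMap_singleton_emit _

-- a nonempty constant-key run: pvRun collapses to pvG
lemma getLastD_mem (cur : List String) (hne : cur ≠ []) : cur.getLastD "" ∈ cur := by
  rw [List.getLastD_eq_getLast?, List.getLast?_eq_getLast_of_ne_nil hne]
  exact List.getLast_mem hne

lemma headD_mem (cur : List String) (hne : cur ≠ []) : cur.headD "" ∈ cur := by
  cases cur with
  | nil => exact absurd rfl hne
  | cons c cs => simp

lemma run_g (l : List String) (cur : List String) (k : Bool) (hne : cur ≠ [])
    (hk : ∀ x ∈ cur, pvKey x = k) :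
    pvRun cur l = if k then pvG [] l else pvG cur l := by
  induction l generalizing cur k with
  | nil =>
    have hh : pvKey (cur.headD "") = k := hk _ (headD_mem cur hne)
    simp only [List.headD_eq_head?] at hh
    cases k with
    | true => simp [pvRun, pvEmit, hh, pvG]
    | false => simp [pvRun, pvEmit, hh, pvG, hne]
  | cons b l ih =>
    have hlast : pvKey (cur.getLastD "") = k := hk _ (getLastD_mem cur hne)
    by_cases hb : pvKey b = k
    · rw [pvRun, hlast, hb, beq_self_eq_true, if_pos rfl]
      have hk' : ∀ x ∈ cur ++ [b], pvKey x = k := by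
        intro x hx
        rcases List.mem_append.mp hx with h | h
        · exact hk _ h
        · simp at h; subst h; exact hb
      rw [ih (cur ++ [b]) k (by simp) hk']
      cases k with
      | true => simp [pvG, hb]
      | false => simp [pvG, hb]
    · have hr : (k == pvKey b) = false := by
        cases hv : pvKey b <;> cases k <;> simp_all
      rw [pvRun, hlast, hr]
      simp only [Bool.false_eq_true, if_false]
      rw [ih [b] (pvKey b) (by simp) (by simp)]
      have hh : pvKey (cur.headD "") = k := hk _ (headD_mem cur hne)
      simp only [List.headD_eq_head?] at hh
      cases k with
      | true =>
        have hb' : pvKey b = false := by cases hv : pvKey b <;> simp_all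
        simp [pvEmit, hh, pvG, hb']
      | false =>
        have hb' : pvKey b = true := by cases hv : pvKey b <;> simp_all
        simp [pvEmit, hh, pvG, hb', hne]

lemma A_eq (s : String) : getDividedBySemester s = pvG [] (pvLines s) := by
  unfold getDividedBySemester
  rw [foldA_spec (pvLines s) (pvLines_ne_nil s) 0 ((pvLines s).length : Int) (by simp) [] []]
  simp

lemma B_eq (s : String) : getDividedBySemester_alt s = pvG [] (pvLines s) := by
  unfold getDividedBySemester_alt
  cases hl : pvLines s with
  | nil => exact absurd hl (pvLines_ne_nil s)
  | cons a rest =>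
    show (List.splitBy.loop (fun a b => pvKey a == pvKey b) rest a [] []).filterMap
        (fun g => if pvKey (g.headD "") then none else some (PySem.Str.join "\n" g))
      = pvG [] (a :: rest)
    rw [loopB_spec]
    simp only [List.reverse_nil, List.filterMap_nil, List.nil_append]
    rw [run_g rest [a] (pvKey a) (by simp) (by simp)]
    cases hk : pvKey a with
    | true => simp [pvG, hk]
    | false => simp [pvG, hk]

-- ===== VERDICT (by name: the statement is the Claim_ definition above) =====
theorem getDividedBySemester_spec : Claim_equal_getDividedBySemester := by
  intro s _
  show getDividedBySemester s = getDividedBySemester_alt s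
  rw [A_eq, B_eq]
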